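-- pv_equiv track=rewrite | github.com/BerkYxvuz/My_Some_Python_Projects | RhymeFounder/maingpt.py | is_rhyme
-- ===== SOURCE A (Python) =====
-- def is_rhyme(word1, word2):
--     min_length = min(len(word1), len(word2))
--     for i in range(min_length, 0, -1):
--         if word1[-i:] == '(' or word1[-i:] == ')' or word2[-i:] == '(' or word2[-i:] == ')':
--             return False
--         if word1[-i:] != word2[-i:]:
--             return False
--     return True
-- ===== SOURCE B (Python) =====
-- def is_rhyme(word1, word2):
--     for c1, c2 in zip(reversed(word1), reversed(word2)):
--         if c1 != c2:
--             return False
--     if word1 and word2: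
--         if word1[-1] in '()' or word2[-1] in '()':
--             return False
--     return True
-- ===== Notes on version B (the rewrite author's own statement) =====
-- stated objective: faster
-- what changed: A compares full suffix slices word[-i:] for every i from min length down to 1 (quadratic when long suffixes agree); B does one backward character-by-character walk over zip(reversed(word1), reversed(word2)) and then a single last-character parenthesis check.
import Mathlib
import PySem

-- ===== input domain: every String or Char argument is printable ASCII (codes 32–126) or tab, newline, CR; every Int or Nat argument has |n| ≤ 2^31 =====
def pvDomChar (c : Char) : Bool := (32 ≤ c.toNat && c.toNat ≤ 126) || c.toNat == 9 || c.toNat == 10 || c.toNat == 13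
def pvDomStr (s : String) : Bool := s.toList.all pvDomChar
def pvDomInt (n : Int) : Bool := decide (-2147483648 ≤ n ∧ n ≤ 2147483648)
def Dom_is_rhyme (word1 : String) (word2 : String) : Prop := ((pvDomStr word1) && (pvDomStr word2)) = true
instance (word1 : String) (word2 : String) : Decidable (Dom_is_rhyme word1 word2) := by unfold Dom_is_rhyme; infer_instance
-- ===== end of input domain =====

-- B replaces A's repeated comparison of ever-shorter suffix slices by one backward pairwise
-- character walk plus a single last-character parenthesis check (objective: faster, quadratic suffix slicing becomes linear).

-- ===== PORT A =====
-- the loop 'for i in range(min_length, 0, -1)' with its two early returns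
def isRhymeLoopA (l1 l2 : List Char) : List Int → Bool
  | [] => true
  | i :: rest =>
    let s1 := PySem.List.slice l1 (some (-i)) none   -- word1[-i:]
    let s2 := PySem.List.slice l2 (some (-i)) none   -- word2[-i:]
    if s1 == ['('] || s1 == [')'] || s2 == ['('] || s2 == [')'] then false
    else if !(s1 == s2) then false
    else isRhymeLoopA l1 l2 rest

def is_rhyme (word1 : String) (word2 : String) : Bool :=
  let l1 := word1.toList
  let l2 := word2.toList
  let minLength : Int := ((min l1.length l2.length : Nat) : Int)
  isRhymeLoopA l1 l2 (PySem.List.pyRange minLength 0 (-1))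

-- ===== PORT B =====
-- 'for c1, c2 in zip(reversed(word1), reversed(word2)): if c1 != c2: return False'
def altZipLoop : List (Char × Char) → Bool
  | [] => true
  | (c1, c2) :: rest => if !(c1 == c2) then false else altZipLoop rest

def is_rhyme_alt (word1 : String) (word2 : String) : Bool :=
  let l1 := word1.toList
  let l2 := word2.toList
  if altZipLoop (l1.reverse.zip l2.reverse) then
    if !l1.isEmpty && !l2.isEmpty then
      -- word1[-1] in '()' ported as the two character comparisons (exact: 1-char needle)
      match PySem.List.pyGet? l1 (-1), PySem.List.pyGet? l2 (-1) with
      | some c1, some c2 =>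
        if c1 == '(' || c1 == ')' || c2 == '(' || c2 == ')' then false else true
      | _, _ => true   -- unreachable: both lists nonempty
    else true
  else false

-- ===== PRECONDITION & SPEC =====
def Spec_is_rhyme (word1 : String) (word2 : String) (out : Bool) : Prop := out = is_rhyme_alt word1 word2
instance (word1 : String) (word2 : String) (out : Bool) : Decidable (Spec_is_rhyme word1 word2 out) := by unfold Spec_is_rhyme; infer_instance

-- ===== CLAIM (what is proved, stated in full; the proofs are below) =====
def Claim_equal_is_rhyme : Prop := ∀ (word1 : String) (word2 : String), Dom_is_rhyme word1 word2 → Spec_is_rhyme word1 word2 (is_rhyme word1 word2)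

-- ===== LEMMAS AND PROOFS =====

def passA (l1 l2 : List Char) (i : Int) : Bool :=
  let s1 := PySem.List.slice l1 (some (-i)) none
  let s2 := PySem.List.slice l2 (some (-i)) none
  !(s1 == ['('] || s1 == [')'] || s2 == ['('] || s2 == [')']) && (s1 == s2)

theorem loopA_eq_all (l1 l2 : List Char) (is : List Int) :
    isRhymeLoopA l1 l2 is = is.all (passA l1 l2) := by
  induction is with
  | nil => rfl
  | cons i rest ih =>
    simp only [isRhymeLoopA, List.all_cons, passA, ih]
    split_ifs with h1 h2 <;> simp_all
    tauto

theorem zipLoop_eq_take (r1 r2 : List Char) :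
    altZipLoop (r1.zip r2) = true ↔ r1.take r2.length = r2.take r1.length := by
  induction r1 generalizing r2 with
  | nil => simp [altZipLoop]
  | cons a r1' ih =>
    cases r2 with
    | nil => simp [altZipLoop]
    | cons b r2' =>
      simp only [List.zip_cons_cons, altZipLoop, List.length_cons, List.take_succ_cons]
      constructor
      · intro h
        split at h
        · exact absurd h (by simp)
        · rename_i hb
          simp only [Bool.not_eq_true', beq_eq_false_iff_ne, ne_eq, not_not] at hb
          simp [(ih r2').mp h, of_decide_eq_true] at *
          exact hb
      · intro h
        obtain ⟨hab, ht⟩ := List.cons.inj h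
        simp [hab, (ih r2').mpr ht]



-- the last-character parenthesis condition, phrased on the length-1 suffix
def parenOK (l : List Char) : Prop :=
  l.drop (l.length - 1) ≠ ['('] ∧ l.drop (l.length - 1) ≠ [')']

-- the common RHS both programs are reduced to
def rhymeProp (l1 l2 : List Char) : Prop :=
  l1.drop (l1.length - min l1.length l2.length) = l2.drop (l2.length - min l1.length l2.length)
  ∧ (l1 ≠ [] → l2 ≠ [] → parenOK l1 ∧ parenOK l2)

theorem drop_sub (l : List Char) (m k : Nat) (hk : k ≤ m) (hm : m ≤ l.length) :
    l.drop (l.length - k) = (l.drop (l.length - m)).drop (m - k) := by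
  rw [List.drop_drop]; congr 1; omega

theorem rev_cons_drop (l : List Char) (c : Char) (r : List Char) (h : l.reverse = c :: r) :
    l.drop (l.length - 1) = [c] := by
  have hl : l = r.reverse ++ [c] := by
    have := congrArg List.reverse h; simpa using this
  subst hl; simp

theorem rev_cons_pyGet (l : List Char) (c : Char) (r : List Char) (h : l.reverse = c :: r) :
    PySem.List.pyGet? l (-1) = some c := by
  have hl : l = r.reverse ++ [c] := by
    have := congrArg List.reverse h; simpa using this
  subst hl
  unfold PySem.List.pyGet? PySem.List.pyIdx?
  simp

theorem passA_char (l1 l2 : List Char) (k : Nat) (hk : 0 < k) :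
    passA l1 l2 (k : Int) = true ↔
      (l1.drop (l1.length - k) ≠ ['('] ∧ l1.drop (l1.length - k) ≠ [')'] ∧
       l2.drop (l2.length - k) ≠ ['('] ∧ l2.drop (l2.length - k) ≠ [')']) ∧
      l1.drop (l1.length - k) = l2.drop (l2.length - k) := by
  unfold passA
  rw [PySem.List.slice_from_neg_natCast l1 k hk, PySem.List.slice_from_neg_natCast l2 k hk]
  simp [and_assoc]

theorem A_iff (l1 l2 : List Char) :
    isRhymeLoopA l1 l2 (PySem.List.pyRange ((min l1.length l2.length : Nat) : Int) 0 (-1)) = true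
      ↔ rhymeProp l1 l2 := by
  rw [loopA_eq_all, List.all_eq_true]
  have hmem : ∀ i : Int, i ∈ PySem.List.pyRange ((min l1.length l2.length : Nat) : Int) 0 (-1)
      ↔ 0 < i ∧ i ≤ ((min l1.length l2.length : Nat) : Int) := by
    intro i; exact PySem.List.mem_pyRange_neg_one
  constructor
  · intro h
    constructor
    · by_cases hm : min l1.length l2.length = 0
      · simp [hm]
      · have := h ((min l1.length l2.length : Nat) : Int)
          ((hmem _).mpr ⟨by exact_mod_cast Nat.pos_of_ne_zero hm, le_refl _⟩)
        exact ((passA_char l1 l2 _ (Nat.pos_of_ne_zero hm)).mp this).2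
    · intro h1 h2
      have hm : 0 < min l1.length l2.length := by
        simp [List.length_pos_iff]; exact ⟨h1, h2⟩
      have := h (1 : Int) ((hmem _).mpr ⟨by norm_num, by exact_mod_cast hm⟩)
      have hp := ((passA_char l1 l2 1 (by norm_num)).mp (by exact_mod_cast this)).1
      exact ⟨⟨hp.1, hp.2.1⟩, ⟨hp.2.2.1, hp.2.2.2⟩⟩
  · rintro ⟨hs, hp⟩ i hi
    obtain ⟨hi0, him⟩ := (hmem i).mp hi
    set m := min l1.length l2.length with hmdef
    obtain ⟨k, rfl⟩ : ∃ k : Nat, i = (k : Int) := ⟨i.toNat, (Int.toNat_of_nonneg hi0.le).symm⟩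
    have hk0 : 0 < k := by exact_mod_cast hi0
    have hkm : k ≤ m := by exact_mod_cast him
    have hk1 : k ≤ l1.length := le_trans hkm (min_le_left _ _)
    have hk2 : k ≤ l2.length := le_trans hkm (min_le_right _ _)
    rw [passA_char l1 l2 k hk0]
    have heq : l1.drop (l1.length - k) = l2.drop (l2.length - k) := by
      rw [drop_sub l1 m k hkm (min_le_left _ _), drop_sub l2 m k hkm (min_le_right _ _), hs]
    refine ⟨?_, heq⟩
    have hlen1 : (l1.drop (l1.length - k)).length = k := by simp; omega
    have hlen2 : (l2.drop (l2.length - k)).length = k := by simp; omega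
    rcases Nat.lt_or_ge k 2 with hk | hk
    · -- k = 1 : the parenthesis condition
      have hk1' : k = 1 := by omega
      subst hk1'
      have hne1 : l1 ≠ [] := by intro h; rw [h] at hk1; simp at hk1
      have hne2 : l2 ≠ [] := by intro h; rw [h] at hk2; simp at hk2
      obtain ⟨p1, p2⟩ := hp hne1 hne2
      exact ⟨p1.1, p1.2, p2.1, p2.2⟩
    · -- k ≥ 2 : a length-k slice is never a singleton
      have ne1 : ∀ c : Char, l1.drop (l1.length - k) ≠ [c] := by
        intro c h; have := congrArg List.length h; rw [hlen1] at this; simp at this; omega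
      have ne2 : ∀ c : Char, l2.drop (l2.length - k) ≠ [c] := by
        intro c h; have := congrArg List.length h; rw [hlen2] at this; simp at this; omega
      exact ⟨ne1 _, ne1 _, ne2 _, ne2 _⟩

theorem take_rev_iff (l1 l2 : List Char) :
    l1.reverse.take l2.length = l2.reverse.take l1.length ↔
      l1.drop (l1.length - min l1.length l2.length)
        = l2.drop (l2.length - min l1.length l2.length) := by
  have t1 : l1.reverse.take l2.length = l1.reverse.take (min l1.length l2.length) := by
    rw [List.take_eq_take_min]; congr 1; simp [Nat.min_comm]
  have t2 : l2.reverse.take l1.length = l2.reverse.take (min l1.length l2.length) := by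
    rw [List.take_eq_take_min]; congr 1; simp
  rw [t1, t2]
  constructor
  · intro h
    rw [← List.reverse_inj]
    rw [List.reverse_drop, List.reverse_drop]
    rw [show l1.length - (l1.length - min l1.length l2.length) = min l1.length l2.length by omega]
    rw [show l2.length - (l2.length - min l1.length l2.length) = min l1.length l2.length by omega]
    exact h
  · intro h
    have := congrArg List.reverse h
    rw [List.reverse_drop, List.reverse_drop] at this
    rw [show l1.length - (l1.length - min l1.length l2.length) = min l1.length l2.length by omega] at this
    rw [show l2.length - (l2.length - min l1.length l2.length) = min l1.length l2.length by omega] at this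
    exact this

theorem B_iff (l1 l2 : List Char) :
    (if altZipLoop (l1.reverse.zip l2.reverse) then
      if !l1.isEmpty && !l2.isEmpty then
        match PySem.List.pyGet? l1 (-1), PySem.List.pyGet? l2 (-1) with
        | some c1, some c2 =>
          if c1 == '(' || c1 == ')' || c2 == '(' || c2 == ')' then false else true
        | _, _ => true
      else true
    else false) = true ↔ rhymeProp l1 l2 := by
  by_cases hne1 : l1 = []
  · subst hne1; simp [altZipLoop, rhymeProp]
  by_cases hne2 : l2 = []
  · subst hne2; simp [altZipLoop, rhymeProp, List.drop_length]
  obtain ⟨c1, r1, h1⟩ := List.exists_cons_of_ne_nil (by simpa using hne1 : l1.reverse ≠ [])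
  obtain ⟨c2, r2, h2⟩ := List.exists_cons_of_ne_nil (by simpa using hne2 : l2.reverse ≠ [])
  rw [rev_cons_pyGet l1 c1 r1 h1, rev_cons_pyGet l2 c2 r2 h2]
  have hg1 : l1.isEmpty = false := by simp [hne1]
  have hg2 : l2.isEmpty = false := by simp [hne2]
  rw [hg1, hg2]
  simp only [Bool.not_false, Bool.and_self, if_true]
  have hz := zipLoop_eq_take l1.reverse l2.reverse
  simp only [List.length_reverse] at hz
  have hdrop1 := rev_cons_drop l1 c1 r1 h1
  have hdrop2 := rev_cons_drop l2 c2 r2 h2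
  constructor
  · intro h
    split at h
    · rename_i hzt
      split at h
      · exact absurd h (by simp)
      · rename_i hpar
        refine ⟨(take_rev_iff l1 l2).mp (hz.mp hzt), fun _ _ => ?_⟩
        simp only [Bool.or_eq_true, beq_iff_eq, not_or] at hpar
        obtain ⟨⟨⟨q1, q2⟩, q3⟩, q4⟩ := hpar
        constructor
        · simp only [parenOK, hdrop1]; simp [q1, q2]
        · simp only [parenOK, hdrop2]; simp [q3, q4]
    · exact absurd h (by simp)
  · rintro ⟨hs, hp⟩
    obtain ⟨p1, p2⟩ := hp hne1 hne2
    rw [if_pos (hz.mpr ((take_rev_iff l1 l2).mpr hs))]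
    simp only [parenOK, hdrop1] at p1
    simp only [parenOK, hdrop2] at p2
    have hfalse : (c1 == '(' || c1 == ')' || c2 == '(' || c2 == ')') = false := by
      simp only [Bool.or_eq_false_iff, beq_eq_false_iff_ne, ne_eq]
      exact ⟨⟨⟨fun h => p1.1 (by rw [h]), fun h => p1.2 (by rw [h])⟩,
              fun h => p2.1 (by rw [h])⟩, fun h => p2.2 (by rw [h])⟩
    rw [hfalse]
    simp

-- ===== VERDICT =====
theorem is_rhyme_spec : Claim_equal_is_rhyme := by
  intro word1 word2 _
  unfold Spec_is_rhyme is_rhyme is_rhyme_alt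
  rw [Bool.eq_iff_iff]
  exact (A_iff word1.toList word2.toList).trans (B_iff word1.toList word2.toList).symm
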